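-- pv_equiv track=rewrite | github.com/GalaxyXieyu/turtle_album | backend/app/services/breeder_mate.py | _compute_new_line_indices
-- ===== SOURCE A (Python) =====
-- from collections import Counter
--
-- def _compute_new_line_indices(old_lines: list[str], new_lines: list[str]) -> set[int]:
--     # Fast path: user appends new lines (the expected workflow).
--     if len(old_lines) <= len(new_lines) and old_lines == new_lines[: len(old_lines)]:
--         return set(range(len(old_lines), len(new_lines)))
--
--     # Conservative fallback: treat lines not "accounted for" by the old multiset as new.
--     # This avoids rewriting old lines when the user only appends, while still handling
--     # minor reorder/edit cases reasonably.
--     old_counts = Counter(l.rstrip() for l in old_lines)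
--     new_indices: set[int] = set()
--     for idx, line in enumerate(new_lines):
--         k = (line or "").rstrip()
--         if old_counts.get(k, 0) > 0:
--             old_counts[k] -= 1
--         else:
--             new_indices.add(idx)
--     return new_indices
-- ===== SOURCE B (Python) =====
-- from collections import Counter
--
--
-- def _compute_new_line_indices(old_lines: list[str], new_lines: list[str]) -> set[int]:
--     # Group the new-line indices by rstripped key; within each group the first
--     # old-count occurrences are accounted for by the old lines, the rest are new.
--     old_counts = Counter(l.rstrip() for l in old_lines)
--     groups: dict[str, list[int]] = {}
--     for i, line in enumerate(new_lines):
--         groups.setdefault(line.rstrip(), []).append(i)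
--     is_new = [False] * len(new_lines)
--     for key, idxs in groups.items():
--         for i in idxs[old_counts[key]:]:
--             is_new[i] = True
--     return {i for i, flag in enumerate(is_new) if flag}
-- ===== Notes on version B (the rewrite author's own statement) =====
-- stated objective: alternative
-- what changed: Drops A's prefix fast path (provably redundant with its fallback) and replaces the single left-to-right decrementing-Counter scan by a grouped two-phase pass: group new-line indices by rstripped key, then per key mark every index past the first old-count occurrences, finally collect the marked indices.
import Mathlib
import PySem

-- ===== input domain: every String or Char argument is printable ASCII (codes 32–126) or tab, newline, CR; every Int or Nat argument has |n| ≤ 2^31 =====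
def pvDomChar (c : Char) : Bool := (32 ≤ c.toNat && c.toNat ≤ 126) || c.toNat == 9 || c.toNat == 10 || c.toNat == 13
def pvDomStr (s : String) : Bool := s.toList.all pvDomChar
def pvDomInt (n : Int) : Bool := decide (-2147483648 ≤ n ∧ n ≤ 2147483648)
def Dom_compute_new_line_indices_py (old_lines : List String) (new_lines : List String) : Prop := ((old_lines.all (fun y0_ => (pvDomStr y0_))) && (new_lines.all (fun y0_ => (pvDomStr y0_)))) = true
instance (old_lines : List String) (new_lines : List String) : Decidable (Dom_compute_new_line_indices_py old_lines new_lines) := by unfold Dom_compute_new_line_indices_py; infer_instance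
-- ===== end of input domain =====

-- B drops A's prefix fast path (redundant with its fallback) and replaces the
-- decrementing-Counter scan by a grouped two-phase pass (objective: alternative);
-- the return values are proved equal on all inputs.

-- ===== PORT A =====
-- loop body of A's fallback: state = (old_counts, new_indices)
def pyA_step (st : PySem.Dict String Int × PySem.Set Int) (p : Int × String) :
    PySem.Dict String Int × PySem.Set Int :=
  let k := PySem.Str.rstrip (if p.2 = "" then "" else p.2)   -- (line or "").rstrip()
  if st.1.getD k 0 > 0 then (st.1.insert k (st.1.getD k 0 - 1), st.2)
  else (st.1, PySem.Set.add st.2 p.1)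

def compute_new_line_indices_py (old_lines : List String) (new_lines : List String) : List Int :=
  if old_lines.length ≤ new_lines.length ∧ old_lines = new_lines.take old_lines.length then
    PySem.List.pyRange (old_lines.length : Int) (new_lines.length : Int) 1
  else
    ((PySem.List.enumerate new_lines 0).foldl pyA_step
      (PySem.Dict.counter (old_lines.map PySem.Str.rstrip), PySem.Set.empty)).2

-- ===== PORT B =====
def compute_new_line_indices_py_alt (old_lines : List String) (new_lines : List String) : List Int :=
  let old_counts := PySem.Dict.counter (old_lines.map PySem.Str.rstrip)
  let groups : PySem.Dict String (List Int) :=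
    (PySem.List.enumerate new_lines 0).foldl
      (fun g p => g.modify (PySem.Str.rstrip p.2) [] (fun l => l ++ [p.1])) PySem.Dict.empty
  let is_new : List Bool :=
    groups.items.foldl
      (fun fl kv =>
        (PySem.List.slice kv.2 (some (old_counts.getD kv.1 0)) none).foldl
          (fun fl i => PySem.List.pySetD fl i true) fl)
      (List.replicate new_lines.length false)
  PySem.Set.ofList ((PySem.List.enumerate is_new 0).filterMap
    (fun p => if p.2 then some p.1 else none))

-- ===== PRECONDITION & SPEC =====
def Spec_compute_new_line_indices_py (old_lines : List String) (new_lines : List String) (out : List Int) : Prop := out = compute_new_line_indices_py_alt old_lines new_lines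
instance (old_lines : List String) (new_lines : List String) (out : List Int) : Decidable (Spec_compute_new_line_indices_py old_lines new_lines out) := by unfold Spec_compute_new_line_indices_py; infer_instance

-- ===== CLAIM (what is proved, stated in full; the proofs are below) =====
def Claim_equal_compute_new_line_indices_py : Prop := ∀ (old_lines : List String) (new_lines : List String), Dom_compute_new_line_indices_py old_lines new_lines → Spec_compute_new_line_indices_py old_lines new_lines (compute_new_line_indices_py old_lines new_lines)

-- ===== LEMMAS AND PROOFS =====

-- Reference function both ports reduce to: scan the rstripped new keys left to
-- right; index i is emitted iff the old count of its key is already covered by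
-- the keys seen so far.
def specNew (oldKeys : List String) : List String → Int → List String → List Int
  | [], _, _ => []
  | k :: rest, i, seen =>
    if oldKeys.count k ≤ seen.count k then i :: specNew oldKeys rest (i+1) (seen ++ [k])
    else specNew oldKeys rest (i+1) (seen ++ [k])

lemma specNew_lb (oldKeys : List String) :
    ∀ (rest : List String) (i : Int) (seen : List String),
      ∀ x ∈ specNew oldKeys rest i seen, i ≤ x := by
  intro rest
  induction rest with
  | nil => intro i seen x hx; simp [specNew] at hx
  | cons k rest ih =>
    intro i seen x hx
    simp only [specNew] at hx
    split at hx
    · rcases List.mem_cons.mp hx with h | h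
      · omega
      · have := ih (i+1) (seen ++ [k]) x h; omega
    · have := ih (i+1) (seen ++ [k]) x hx; omega

lemma specNew_pairwise (oldKeys : List String) :
    ∀ (rest : List String) (i : Int) (seen : List String),
      (specNew oldKeys rest i seen).Pairwise (· < ·) := by
  intro rest
  induction rest with
  | nil => intro i seen; simp [specNew]
  | cons k rest ih =>
    intro i seen
    simp only [specNew]
    split
    · exact List.Pairwise.cons
        (fun y hy => by have := specNew_lb oldKeys rest (i+1) (seen ++ [k]) y hy; omega)
        (ih (i+1) (seen ++ [k]))
    · exact ih (i+1) (seen ++ [k])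

-- B equals specNew
lemma B_filterMap_eq (oldKeys newKeys : List String) :
    ∀ (rest pre : List String), newKeys = pre ++ rest →
      (PySem.List.enumerate rest (pre.length : Int)).filterMap (fun p =>
        if oldKeys.count p.2 ≤ (PySem.List.slice newKeys none (some p.1)).count p.2
        then some p.1 else none)
      = specNew oldKeys rest (pre.length : Int) pre := by
  intro rest
  induction rest with
  | nil => intro pre h; simp [PySem.List.enumerate_nil, specNew]
  | cons k rest ih =>
    intro pre h
    rw [PySem.List.enumerate_cons]
    have hsl : PySem.List.slice newKeys none (some (pre.length : Int)) = pre := by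
      rw [PySem.List.slice_to_natCast, h, List.take_left]
    have h2 : newKeys = (pre ++ [k]) ++ rest := by simp [h]
    have ihh := ih (pre ++ [k]) h2
    have hlen : ((pre ++ [k]).length : Int) = (pre.length : Int) + 1 := by
      simp
    rw [hlen] at ihh
    by_cases hc : oldKeys.count k ≤ pre.count k
    · simp [hsl, specNew, hc, ihh]
    · simp [hsl, specNew, hc, ihh]

-- positions (at offset s) of key k in a list of keys
def posFrom : List String → String → Int → List Int
  | [], _, _ => []
  | x :: xs, k, s => if x = k then s :: posFrom xs k (s+1) else posFrom xs k (s+1)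

lemma posFrom_lb : ∀ (keys : List String) (k : String) (s : Int),
    ∀ x ∈ posFrom keys k s, s ≤ x := by
  intro keys
  induction keys with
  | nil => intro k s x hx; simp [posFrom] at hx
  | cons y ys ih =>
    intro k s x hx
    simp only [posFrom] at hx
    split at hx
    · rcases List.mem_cons.mp hx with h | h
      · omega
      · have := ih k (s+1) x h; omega
    · have := ih k (s+1) x hx; omega

lemma posFrom_ub : ∀ (keys : List String) (k : String) (s : Int),
    ∀ x ∈ posFrom keys k s, x < s + keys.length := by
  intro keys
  induction keys with
  | nil => intro k s x hx; simp [posFrom] at hx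
  | cons y ys ih =>
    intro k s x hx
    simp only [posFrom] at hx
    rw [List.length_cons]
    split at hx
    · rcases List.mem_cons.mp hx with h | h
      · push_cast; omega
      · have := ih k (s+1) x h; push_cast at this ⊢; omega
    · have := ih k (s+1) x hx; push_cast at this ⊢; omega

lemma posFrom_drop_mem : ∀ (keys : List String) (k : String) (s : Int) (c j : Nat),
    (s + (j : Int) ∈ (posFrom keys k s).drop c
      ↔ ∃ _ : j < keys.length, keys.getD j "" = k ∧ c ≤ (keys.take j).count k) := by
  intro keys
  induction keys with
  | nil => intro k s c j; simp [posFrom]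
  | cons y ys ih =>
    intro k s c j
    have hlb : ∀ (c : Nat), ∀ x ∈ (posFrom ys k (s+1)).drop c, s + 1 ≤ x :=
      fun c x hx => posFrom_lb ys k (s+1) x (List.drop_subset _ _ hx)
    have hsh : ∀ j : Nat, s + ((j + 1 : Nat) : Int) = (s + 1) + (j : Int) := by
      intro j; push_cast; ring
    by_cases hy : y = k
    · cases c with
      | zero =>
        cases j with
        | zero => simp [posFrom, hy]
        | succ j =>
          simp only [posFrom, if_pos hy, List.drop_zero, List.mem_cons, hsh j]
          rw [show (posFrom ys k (s+1)) = (posFrom ys k (s+1)).drop 0 by simp, ih k (s+1) 0 j]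
          constructor
          · rintro (h | h)
            · omega
            · obtain ⟨hj, hk, hc⟩ := h
              exact ⟨by simpa using Nat.succ_lt_succ hj, by simpa using hk, by omega⟩
          · rintro ⟨hj, hk, hc⟩
            exact Or.inr ⟨by simp only [List.length_cons] at hj ⊢; omega, by simpa using hk, by omega⟩
      | succ c =>
        cases j with
        | zero =>
          simp only [posFrom, if_pos hy, Nat.cast_zero, add_zero, List.drop_succ_cons]
          constructor
          · intro h; exfalso; have := hlb _ _ h; omega
          · rintro ⟨hj, hk, hc⟩; simp at hc
        | succ j =>
          simp only [posFrom, if_pos hy, List.drop_succ_cons, hsh j]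
          rw [ih k (s+1) c j]
          constructor
          · rintro ⟨hj, hk, hc⟩
            refine ⟨by simp only [List.length_cons] at hj ⊢; omega, by simpa using hk, ?_⟩
            simp only [List.take_succ_cons, List.count_cons, hy]
            simp
            omega
          · rintro ⟨hj, hk, hc⟩
            refine ⟨by simp only [List.length_cons] at hj ⊢; omega, by simpa using hk, ?_⟩
            simp only [List.take_succ_cons, List.count_cons, hy] at hc
            simp at hc
            omega
    · cases j with
      | zero =>
        simp only [posFrom, if_neg hy, Nat.cast_zero, add_zero]
        constructor
        · intro h; exfalso; have := hlb _ _ h; omega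
        · rintro ⟨hj, hk, hc⟩
          simp at hk
          exact absurd hk hy
      | succ j =>
        simp only [posFrom, if_neg hy, hsh j]
        rw [ih k (s+1) c j]
        constructor
        · rintro ⟨hj, hk, hc⟩
          refine ⟨by simp only [List.length_cons] at hj ⊢; omega, by simpa using hk, ?_⟩
          simpa [List.take_succ_cons, List.count_cons, hy] using hc
        · rintro ⟨hj, hk, hc⟩
          refine ⟨by simp only [List.length_cons] at hj ⊢; omega, by simpa using hk, ?_⟩
          simpa [List.take_succ_cons, List.count_cons, hy] using hc

lemma group_getD (new_suffix : List String) : ∀ (s : Int)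
    (g : PySem.Dict String (List Int)) (k : String),
    ((PySem.List.enumerate new_suffix s).foldl
        (fun g p => g.modify (PySem.Str.rstrip p.2) [] (fun l => l ++ [p.1])) g).getD k []
      = g.getD k [] ++ posFrom (new_suffix.map PySem.Str.rstrip) k s := by
  induction new_suffix with
  | nil => intro s g k; simp [PySem.List.enumerate_nil, posFrom]
  | cons line rest ih =>
    intro s g k
    rw [PySem.List.enumerate_cons]
    simp only [List.foldl_cons]
    rw [ih]
    rw [PySem.Dict.getD_modify]
    simp only [List.map_cons, posFrom]
    by_cases hk : k = PySem.Str.rstrip line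
    · rw [if_pos hk, if_pos hk.symm]
      simp [hk]
    · rw [if_neg hk, if_neg (fun h => hk h.symm)]

lemma group_mem_keys (new_suffix : List String) : ∀ (s : Int)
    (g : PySem.Dict String (List Int)) (k : String),
    (k ∈ ((PySem.List.enumerate new_suffix s).foldl
        (fun g p => g.modify (PySem.Str.rstrip p.2) [] (fun l => l ++ [p.1])) g).keys)
      ↔ k ∈ g.keys ∨ k ∈ new_suffix.map PySem.Str.rstrip := by
  induction new_suffix with
  | nil => intro s g k; simp [PySem.List.enumerate_nil]
  | cons line rest ih =>
    intro s g k
    rw [PySem.List.enumerate_cons]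
    simp only [List.foldl_cons]
    rw [ih]
    have hmk : ∀ k' : String, k' ∈ (g.modify (PySem.Str.rstrip line) []
        (fun l => l ++ [(s, line).1])).keys ↔ k' = PySem.Str.rstrip line ∨ k' ∈ g.keys := by
      intro k'
      rw [PySem.Dict.keys_modify]
      exact PySem.Dict.mem_keys_insert _ _ _ _
    rw [hmk]
    simp only [List.map_cons, List.mem_cons]
    tauto

lemma setTrue_fold : ∀ (L : List Int) (fl : List Bool),
    (∀ x ∈ L, 0 ≤ x ∧ x < (fl.length : Int)) →
    ((L.foldl (fun fl i => PySem.List.pySetD fl i true) fl).length = fl.length ∧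
     ∀ j : Nat, j < fl.length →
       PySem.List.pyGetD (L.foldl (fun fl i => PySem.List.pySetD fl i true) fl) (j : Int) false
         = if (j : Int) ∈ L then true else PySem.List.pyGetD fl (j : Int) false) := by
  intro L
  induction L with
  | nil => intro fl h; simp
  | cons x L ih =>
    intro fl h
    simp only [List.foldl_cons]
    have hx := h x (List.mem_cons_self)
    have hlen : (PySem.List.pySetD fl x true).length = fl.length :=
      PySem.List.length_pySetD _ _ _
    have ihh := ih (PySem.List.pySetD fl x true)
      (by intro y hy; rw [hlen]; exact h y (List.mem_cons_of_mem _ hy))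
    refine ⟨by rw [ihh.1, hlen], ?_⟩
    intro j hj
    rw [ihh.2 j (by omega)]
    have hxn : x = ((x.toNat : Nat) : Int) := by omega
    by_cases hmem : (j : Int) ∈ L
    · simp [hmem]
    · rw [if_neg hmem]
      rw [hxn, PySem.List.pyGetD_pySetD_natCast fl x.toNat j true false (by omega)]
      by_cases hje : j = x.toNat
      · rw [if_pos hje, if_pos (by rw [List.mem_cons]; left; omega)]
      · rw [if_neg hje, if_neg (by rw [List.mem_cons]; push Not; exact ⟨by omega, hmem⟩)]

lemma mark_fold (newKeys oldKeys : List String) :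
    ∀ (ks : List String) (fl : List Bool), fl.length = newKeys.length →
    ((ks.foldl (fun fl k => ((posFrom newKeys k 0).drop (oldKeys.count k)).foldl
        (fun fl i => PySem.List.pySetD fl i true) fl) fl).length = newKeys.length ∧
     ∀ j : Nat, j < newKeys.length →
       PySem.List.pyGetD (ks.foldl (fun fl k => ((posFrom newKeys k 0).drop (oldKeys.count k)).foldl
          (fun fl i => PySem.List.pySetD fl i true) fl) fl) (j : Int) false
         = if ∃ k ∈ ks, (j : Int) ∈ (posFrom newKeys k 0).drop (oldKeys.count k) then true
           else PySem.List.pyGetD fl (j : Int) false) := by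
  intro ks
  induction ks with
  | nil => intro fl hfl; simp [hfl]
  | cons k0 ks ih =>
    intro fl hfl
    simp only [List.foldl_cons]
    have hrange : ∀ x ∈ (posFrom newKeys k0 0).drop (oldKeys.count k0),
        0 ≤ x ∧ x < (fl.length : Int) := by
      intro x hx
      have h1 := posFrom_lb newKeys k0 0 x (List.drop_subset _ _ hx)
      have h2 : x < (0 : Int) + newKeys.length :=
        posFrom_ub newKeys k0 0 x (List.drop_subset _ _ hx)
      constructor
      · omega
      · rw [hfl]; omega
    have hset := setTrue_fold ((posFrom newKeys k0 0).drop (oldKeys.count k0)) fl hrange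
    have ihh := ih _ (by rw [hset.1, hfl])
    refine ⟨by rw [ihh.1], ?_⟩
    intro j hj
    rw [ihh.2 j hj]
    rw [hset.2 j (by omega)]
    by_cases h1 : ∃ k ∈ ks, (j : Int) ∈ (posFrom newKeys k 0).drop (oldKeys.count k)
    · rw [if_pos h1, if_pos ⟨h1.choose, List.mem_cons_of_mem _ h1.choose_spec.1, h1.choose_spec.2⟩]
    · rw [if_neg h1]
      by_cases h2 : (j : Int) ∈ (posFrom newKeys k0 0).drop (oldKeys.count k0)
      · rw [if_pos h2, if_pos ⟨k0, List.mem_cons_self, h2⟩]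
      · rw [if_neg h2, if_neg (by
          rintro ⟨k, hk, hmem⟩
          rcases List.mem_cons.mp hk with rfl | hk2
          · exact h2 hmem
          · exact h1 ⟨k, hk2, hmem⟩)]

lemma fm_cong : ∀ (xs : List Bool) (ys : List String) (s : Int)
    (f : Int × String → Option Int),
    xs.length = ys.length →
    (∀ j : Nat, j < ys.length →
      (if xs.getD j false = true then some (s + (j : Int)) else none)
        = f (s + (j : Int), ys.getD j "")) →
    (PySem.List.enumerate xs s).filterMap (fun p => if p.2 then some p.1 else none)
      = (PySem.List.enumerate ys s).filterMap f := by
  intro xs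
  induction xs with
  | nil =>
    intro ys s f hlen hcong
    cases ys with
    | nil => simp [PySem.List.enumerate_nil]
    | cons y ys => simp at hlen
  | cons x xs ih =>
    intro ys s f hlen hcong
    cases ys with
    | nil => simp at hlen
    | cons y ys =>
      rw [PySem.List.enumerate_cons, PySem.List.enumerate_cons]
      have h0 := hcong 0 (by simp)
      simp only [List.getD_cons_zero, Nat.cast_zero, add_zero] at h0
      have hrec := ih ys (s+1) f (by simpa using hlen) (fun j hj => by
        have hj' : j + 1 < (y :: ys).length := by simp; omega
        have := hcong (j+1) hj'
        have harith : s + ((j + 1 : Nat) : Int) = (s + 1) + (j : Int) := by push_cast; ring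
        rw [harith] at this
        simpa [List.getD_cons_succ] using this)
      simp only [List.filterMap_cons, ← h0]
      cases x
      · simp [hrec]
      · simp [hrec]

lemma B_eq_spec (old_lines new_lines : List String) :
    compute_new_line_indices_py_alt old_lines new_lines
      = specNew (old_lines.map PySem.Str.rstrip) (new_lines.map PySem.Str.rstrip) 0 [] := by
  unfold compute_new_line_indices_py_alt
  dsimp only
  set oldKeys := old_lines.map PySem.Str.rstrip with hok
  set newKeys := new_lines.map PySem.Str.rstrip with hnk
  set G := (PySem.List.enumerate new_lines 0).foldl
      (fun g p => g.modify (PySem.Str.rstrip p.2) [] (fun l => l ++ [p.1]))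
      (PySem.Dict.empty : PySem.Dict String (List Int)) with hG
  have hnodup : G.keys.Nodup := by
    rw [hG]
    exact PySem.Dict.nodup_keys_foldl_modify_key _ (fun p : Int × String => PySem.Str.rstrip p.2)
      [] (fun _ p l => l ++ [p.1]) PySem.Dict.empty (by rw [PySem.Dict.keys_empty]; exact List.nodup_nil)
  have hgetD : ∀ k, G.getD k [] = posFrom newKeys k 0 := by
    intro k
    rw [hG, group_getD new_lines 0 PySem.Dict.empty k, PySem.Dict.getD_empty]
    simp [hnk]
  have hmemK : ∀ k, k ∈ G.keys ↔ k ∈ newKeys := by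
    intro k
    rw [hG, group_mem_keys new_lines 0 PySem.Dict.empty k, PySem.Dict.keys_empty]
    simp [hnk]
  have hitems : G.items = G.keys.map (fun k => (k, posFrom newKeys k 0)) := by
    rw [PySem.Dict.items_eq_map_keys G hnodup []]
    exact List.map_congr_left (fun k _ => by rw [hgetD k])
  rw [hitems, List.foldl_map]
  rw [PySem.List.foldl_congr_mem _ _
    (fun fl k => ((posFrom newKeys k 0).drop (oldKeys.count k)).foldl
      (fun fl i => PySem.List.pySetD fl i true) fl) _
    (by
      intro fl k _
      rw [PySem.Dict.getD_counter, PySem.List.slice_from_natCast])]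
  have hm : new_lines.length = newKeys.length := by rw [hnk, List.length_map]
  have hmark := mark_fold newKeys oldKeys G.keys (List.replicate new_lines.length false)
    (by rw [List.length_replicate, hm])
  have hcond : ∀ j : Nat, j < newKeys.length →
      ((∃ k ∈ G.keys, (j : Int) ∈ (posFrom newKeys k 0).drop (oldKeys.count k))
        ↔ oldKeys.count (newKeys.getD j "") ≤ (newKeys.take j).count (newKeys.getD j "")) := by
    intro j hj
    constructor
    · rintro ⟨k, _, hmem⟩
      have := (posFrom_drop_mem newKeys k 0 (oldKeys.count k) j).mp (by simpa using hmem)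
      obtain ⟨_, hk, hc⟩ := this
      rw [hk]
      exact hc
    · intro hc
      refine ⟨newKeys.getD j "", (hmemK _).mpr ?_, ?_⟩
      · have := List.getD_eq_getElem newKeys "" hj
        rw [this]
        exact List.getElem_mem hj
      · have := (posFrom_drop_mem newKeys (newKeys.getD j "") 0
          (oldKeys.count (newKeys.getD j "")) j).mpr ⟨hj, rfl, hc⟩
        simpa using this
  rw [fm_cong _ newKeys 0
    (fun p => if oldKeys.count p.2 ≤ (PySem.List.slice newKeys none (some p.1)).count p.2
      then some p.1 else none)
    (by rw [hmark.1])
    (by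
      intro j hj
      have hflag := hmark.2 j hj
      rw [PySem.List.pyGetD_natCast, PySem.List.pyGetD_natCast,
        List.getD_replicate false (by omega)] at hflag
      have hzj : (0 : Int) + (j : Int) = ((j : Nat) : Int) := by ring
      rw [hzj]
      simp only [PySem.List.slice_to_natCast]
      by_cases hC : ∃ k ∈ G.keys, (j : Int) ∈ (posFrom newKeys k 0).drop (oldKeys.count k)
      · rw [if_pos hC] at hflag
        rw [hflag, if_pos ((hcond j hj).mp hC), if_pos rfl]
      · rw [if_neg hC] at hflag
        rw [hflag, if_neg (fun h => hC ((hcond j hj).mpr h))]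
        simp)]
  have hBF := B_filterMap_eq oldKeys newKeys newKeys [] (by simp)
  simp only [List.length_nil, Nat.cast_zero] at hBF
  rw [hBF]
  exact PySem.Set.ofList_eq_self_of_nodup _
    ((specNew_pairwise _ _ _ _).imp (fun h => ne_of_lt h))

-- A's fallback loop equals specNew
lemma A_fold_eq (oldKeys : List String) :
    ∀ (rest : List String) (s : Int) (seen : List String) (acc : PySem.Set Int)
      (d : PySem.Dict String Int),
      (∀ k, d.getD k 0 = max ((oldKeys.count k : Int) - (seen.count k : Int)) 0) →
      (∀ x ∈ acc, x < s) →
      ((PySem.List.enumerate rest s).foldl pyA_step (d, acc)).2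
        = acc ++ specNew oldKeys (rest.map PySem.Str.rstrip) s seen := by
  intro rest
  induction rest with
  | nil => intro s seen acc d hd hacc; simp [PySem.List.enumerate_nil, specNew]
  | cons line rest ih =>
    intro s seen acc d hd hacc
    rw [PySem.List.enumerate_cons]
    simp only [List.foldl_cons]
    have hk : PySem.Str.rstrip (if line = "" then "" else line) = PySem.Str.rstrip line := by
      split
      · simp_all
      · rfl
    have hcnt : ∀ k' : String, (seen ++ [PySem.Str.rstrip line]).count k'
        = seen.count k' + if k' = PySem.Str.rstrip line then 1 else 0 := by
      intro k'
      by_cases hkk : k' = PySem.Str.rstrip line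
      · simp [List.count_append, hkk]
      · simp [List.count_append, List.count_eq_zero, hkk]
    by_cases hpos : d.getD (PySem.Str.rstrip line) 0 > 0
    · have hlt : (seen.count (PySem.Str.rstrip line) : Int)
          < (oldKeys.count (PySem.Str.rstrip line) : Int) := by
        have := hd (PySem.Str.rstrip line); omega
      have hstep : pyA_step (d, acc) (s, line)
          = (d.insert (PySem.Str.rstrip line) (d.getD (PySem.Str.rstrip line) 0 - 1), acc) := by
        simp only [pyA_step, hk]
        rw [if_pos hpos]
      rw [hstep]
      have ihh := ih (s+1) (seen ++ [PySem.Str.rstrip line]) acc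
        (d.insert (PySem.Str.rstrip line) (d.getD (PySem.Str.rstrip line) 0 - 1))
        (by
          intro k'
          rw [PySem.Dict.getD_insert, hcnt k']
          by_cases hkk : k' = PySem.Str.rstrip line
          · rw [if_pos hkk, if_pos hkk]
            have h1 := hd (PySem.Str.rstrip line)
            subst hkk; omega
          · rw [if_neg hkk, if_neg hkk]
            have := hd k'; push_cast; push_cast at this; omega)
        (by intro x hx; have := hacc x hx; omega)
      rw [ihh]
      simp only [List.map_cons, specNew]
      rw [if_neg (by omega)]
    · have hle : (oldKeys.count (PySem.Str.rstrip line) : Int)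
          ≤ (seen.count (PySem.Str.rstrip line) : Int) := by
        have := hd (PySem.Str.rstrip line); omega
      have hnm : s ∉ acc := fun h => absurd (hacc s h) (lt_irrefl s)
      have hadd : PySem.Set.add acc s = acc ++ [s] := by
        simp only [PySem.Set.add]
        rw [if_neg (by
          intro hc
          exact hnm ((PySem.Set.contains_iff acc s).mp (by simpa using hc)))]
      have hstep : pyA_step (d, acc) (s, line) = (d, acc ++ [s]) := by
        simp only [pyA_step, hk]
        rw [if_neg hpos, hadd]
      rw [hstep]
      have ihh := ih (s+1) (seen ++ [PySem.Str.rstrip line]) (acc ++ [s]) d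
        (by
          intro k'
          rw [hcnt k']
          by_cases hkk : k' = PySem.Str.rstrip line
          · rw [if_pos hkk]
            have h1 := hd k'
            subst hkk; omega
          · rw [if_neg hkk]
            have := hd k'; omega)
        (by
          intro x hx
          rcases List.mem_append.mp hx with h | h
          · have := hacc x h; omega
          · simp at h; omega)
      rw [ihh]
      simp only [List.map_cons, specNew]
      rw [if_pos (by omega)]
      simp

-- fast path: when old is a literal prefix of new, specNew is exactly the appended range
lemma spec_range (oldKeys : List String) :
    ∀ (rest : List String) (i : Int) (seen : List String),
      (∀ k, oldKeys.count k ≤ seen.count k) →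
      specNew oldKeys rest i seen = PySem.List.pyRange i (i + rest.length) 1 := by
  intro rest
  induction rest with
  | nil => intro i seen h; simp [specNew, pysem]
  | cons k rest ih =>
    intro i seen h
    have h' : ∀ k', oldKeys.count k' ≤ (seen ++ [k]).count k' := by
      intro k'; rw [List.count_append]; exact le_trans (h k') (Nat.le_add_right _ _)
    simp only [specNew, if_pos (h k), ih (i+1) (seen ++ [k]) h', List.length_cons]
    push_cast
    have harith : i + 1 + (rest.length : Int) = i + ((rest.length : Int) + 1) := by ring
    rw [harith]
    conv_rhs => rw [PySem.List.pyRange_one_cons (show i < i + ((rest.length : Int) + 1) by omega)]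

lemma spec_prefix (oldKeys tail : List String) :
    ∀ (rest pre : List String), oldKeys = pre ++ rest →
      specNew oldKeys (rest ++ tail) (pre.length : Int) pre
        = PySem.List.pyRange (oldKeys.length : Int) (oldKeys.length + tail.length) 1 := by
  intro rest
  induction rest with
  | nil =>
    intro pre hpre
    simp only [List.append_nil] at hpre
    subst hpre
    simp only [List.nil_append]
    exact spec_range oldKeys tail _ oldKeys (fun k => le_refl _)
  | cons k rest ih =>
    intro pre hpre
    have hcnt : ¬ oldKeys.count k ≤ pre.count k := by
      rw [hpre, List.count_append]
      simp [List.count_cons_self]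
    simp only [List.cons_append, specNew, if_neg hcnt]
    have ihh := ih (pre ++ [k]) (by simp [hpre])
    have hlen : ((pre ++ [k]).length : Int) = (pre.length : Int) + 1 := by simp
    rw [hlen] at ihh
    exact ihh

-- ===== VERDICT (by name: the statement is the Claim_ definition above) =====
theorem compute_new_line_indices_py_spec : Claim_equal_compute_new_line_indices_py := by
  intro old_lines new_lines _
  unfold Spec_compute_new_line_indices_py
  rw [B_eq_spec]
  unfold compute_new_line_indices_py
  split
  · rename_i hcond
    obtain ⟨hle, hpre⟩ := hcond
    have hnew : new_lines = old_lines ++ new_lines.drop old_lines.length := by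
      conv_lhs => rw [← List.take_append_drop old_lines.length new_lines]
      rw [← hpre]
    have hkeys : new_lines.map PySem.Str.rstrip
        = old_lines.map PySem.Str.rstrip ++ (new_lines.drop old_lines.length).map PySem.Str.rstrip := by
      conv_lhs => rw [hnew]
      rw [List.map_append]
    have hsp := spec_prefix (old_lines.map PySem.Str.rstrip)
      ((new_lines.drop old_lines.length).map PySem.Str.rstrip)
      (old_lines.map PySem.Str.rstrip) [] (by simp)
    simp only [List.length_nil, Nat.cast_zero] at hsp
    rw [hkeys, hsp]
    simp only [List.length_map, List.length_drop]
    congr 1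
    omega
  · have hfold := A_fold_eq (old_lines.map PySem.Str.rstrip) new_lines 0 [] PySem.Set.empty
      (PySem.Dict.counter (old_lines.map PySem.Str.rstrip))
      (by
        intro k
        rw [PySem.Dict.getD_counter]
        simp)
      (by intro x hx; simp [PySem.Set.empty] at hx)
    rw [hfold]
    simp
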